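-- pv_equiv track=rewrite | github.com/donut0310/Problem-Solving-Python- | Programmers/Review/[카카오 블라인드] 괄호변환.py | solution
-- ===== SOURCE A (Python) =====
-- def seperation(p): #문자열 p를 균형잡힌 괄호 문자열 u,v로 분리
--     u,_u=[p[0]],[p[0]]
--     for i in range(1,len(p)):
--         if p[i]!=_u[-1]: _u.pop()
--         else: _u.append(p[i])
--         u.append(p[i])
--         if not len(_u):
--             break
--     return ''.join(u), p[len(u):]
--
-- def is_right(u): #올바른 문자열 검사
--     if u[0]==')': return False
--     tmp=[u[0]]
--     for i in range(1,len(u)):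
--         if tmp[-1] != u[i]: tmp.pop()
--         else: tmp.append(u[i])
--     if len(tmp): return False
--     return True
--
-- def solution(p):
--     str=''
--     if not len(p): return '' #1
--     u,v=seperation(p) #2
--     if is_right(u): u+=solution(v) #3
--     else: #4
--         str+='(' #4-1
--         str+=solution(v) #4-2
--         str+=')' #4-3
--         u=u[1:-1] #4-4
--         tmp=''
--         for i in range(len(u)):
--             if u[i]=='(': tmp+=')'
--             else: tmp+='('
--         str+=tmp
--         return str
--     u+=str
--     return u
-- ===== SOURCE B (Python) =====
-- def solution(p):
--     # one pass: split p into primitive chunks with their final balance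
--     chunks = []
--     i, n = 0, len(p)
--     while i < n:
--         c0, bal, j = p[i], 0, i
--         while j < n:
--             bal += 1 if p[j] == c0 else -1
--             j += 1
--             if bal == 0:
--                 break
--         chunks.append((p[i:j], bal))
--         i = j
--     # assemble iteratively, folding the chunks back-to-front
--     res = ''
--     for u, bal in reversed(chunks):
--         if bal == 0 and u[0] != ')':
--             res = u + res
--         else:
--             res = '(' + res + ')' + ''.join(')' if ch == '(' else '(' for ch in u[1:-1])
--     return res
-- ===== Notes on version B (the rewrite author's own statement) =====
-- stated objective: alternative
-- what changed: A is a recursive divide-and-conquer that per level runs two character-stack scans (seperation builds a list stack and joins u, then is_right re-scans u with a second stack); B is non-recursive: one left-to-right integer-balance pass splits p into its primitive chunks, then a single reverse fold over the chunk list assembles the answer, classifying each chunk from its stored balance and first character.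
import Mathlib
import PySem

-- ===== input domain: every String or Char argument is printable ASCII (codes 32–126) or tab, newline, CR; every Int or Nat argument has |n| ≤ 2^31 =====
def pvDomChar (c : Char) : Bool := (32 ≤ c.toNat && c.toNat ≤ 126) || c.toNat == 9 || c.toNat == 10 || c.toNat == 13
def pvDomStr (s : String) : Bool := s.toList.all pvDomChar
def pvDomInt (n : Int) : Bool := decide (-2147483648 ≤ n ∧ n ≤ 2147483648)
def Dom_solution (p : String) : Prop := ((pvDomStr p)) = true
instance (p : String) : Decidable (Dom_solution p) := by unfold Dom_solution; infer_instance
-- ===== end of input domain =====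

-- B replaces A's recursive divide-and-conquer (two character-stack scans per level) by one
-- balance-counter pass splitting p into primitive chunks plus a single reverse fold: alternative.

-- ===== PORT A =====
-- seperation's loop: u accumulates the chars seen, stk (Python's _u) is the stack;
-- on each char: pop if it differs from the top, push if equal; break when the stack empties.
def sepLoopA (rest : List Char) (u : List Char) (stk : List Char) : List Char × List Char :=
  match rest, stk with
  | [], _ => (u, [])                       -- loop ran out of indices: v = p[len(u):] = []
  | c :: rs, t :: ts =>
      let stk' := if c ≠ t then ts else c :: t :: ts
      let u' := u ++ [c]
      if stk'.isEmpty then (u', rs) else sepLoopA rs u' stk'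
  | _ :: _, [] => (u, [])                  -- unreachable: Python breaks as soon as _u is empty

def seperationA (p : List Char) : List Char × List Char :=
  match p with
  | [] => ([], [])                         -- unreachable: solution guards the empty string
  | c :: rs => sepLoopA rs [c] [c]

-- is_right's loop over u[1:] with stack tmp (initially [u[0]])
def isRightLoopA (rest : List Char) (tmp : List Char) : List Char :=
  match rest, tmp with
  | [], _ => tmp
  | c :: rs, t :: ts => isRightLoopA rs (if t ≠ c then ts else c :: t :: ts)
  | _ :: _, [] => []                       -- Python raises IndexError here; unreachable from solution

def isRightA (u : List Char) : Bool :=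
  match u with
  | [] => true                             -- unreachable: u from seperation is nonempty
  | c :: rs => if c = ')' then false else (isRightLoopA rs [c]).isEmpty

-- the flipping loop of branch #4
def flipA (l : List Char) : List Char :=
  match l with
  | [] => []
  | c :: rs => (if c = '(' then ')' else '(') :: flipA rs

theorem sepLoopA_snd_le (rest u stk : List Char) :
    (sepLoopA rest u stk).2.length ≤ rest.length := by
  induction rest generalizing u stk with
  | nil => cases stk <;> simp [sepLoopA]
  | cons c rs ih =>
      cases stk with
      | nil => simp [sepLoopA]
      | cons t ts =>
          simp only [sepLoopA]
          split <;> split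
          all_goals first
            | exact Nat.le_succ_of_le (ih _ _)
            | simp

def solA (l : List Char) : List Char :=
  match l with
  | [] => []                               -- #1
  | c :: rs =>
      let uv := seperationA (c :: rs)      -- #2
      if isRightA uv.1 then uv.1 ++ solA uv.2     -- #3  (then u += str where str = '')
      else                                 -- #4
        '(' :: solA uv.2 ++ [')'] ++ flipA (uv.1.drop 1).dropLast   -- u[1:-1] flipped
termination_by l.length
decreasing_by
  all_goals
    simp only [seperationA] at *
    exact Nat.lt_succ_of_le (sepLoopA_snd_le rs [c] [c])

def solution (p : String) : String := String.ofList (solA p.toList)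

-- ===== PORT B =====
-- B's inner while loop: consume chars keeping the balance relative to c0, stop when it
-- returns to 0 (checked after each char) or the string ends; returns (index after cut, balance).
def cutB (rest : List Char) (c0 : Char) (bal : Int) (j : Nat) : Nat × Int :=
  match rest with
  | [] => (j, bal)
  | c :: rs =>
      let bal' := bal + if c = c0 then 1 else -1
      if bal' = 0 then (j + 1, bal') else cutB rs c0 bal' (j + 1)

theorem cutB_fst_ge (rest : List Char) (c0 : Char) (bal : Int) (j : Nat) :
    j ≤ (cutB rest c0 bal j).1 := by
  induction rest generalizing bal j with
  | nil => simp [cutB]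
  | cons c rs ih =>
      simp only [cutB]
      by_cases hb : bal + (if c = c0 then 1 else -1) = 0
      · rw [if_pos hb]; simp
      · rw [if_neg hb]; exact le_trans (Nat.le_succ j) (ih _ _)

-- B's outer while loop: the list of primitive chunks with their final balance
def chunksB (l : List Char) : List (List Char × Int) :=
  match l with
  | [] => []
  | c0 :: rs =>
      let jb := cutB (c0 :: rs) c0 0 0
      ((c0 :: rs).take jb.1, jb.2) :: chunksB ((c0 :: rs).drop jb.1)
termination_by l.length
decreasing_by
  have h1 : (1 : Nat) ≤ (cutB (c0 :: rs) c0 0 0).1 := by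
    simp only [cutB]
    norm_num
    exact cutB_fst_ge rs c0 1 1
  simp only [List.length_drop, List.length_cons]
  omega

-- B's assembly step: for u in reversed(chunks): res = … (a right fold over the chunk list)
def stepB (ub : List Char × Int) (res : List Char) : List Char :=
  if ub.2 = 0 ∧ ub.1.headD ' ' ≠ ')' then ub.1 ++ res
  else '(' :: res ++ [')'] ++ ((ub.1.drop 1).dropLast.map (fun ch => if ch = '(' then ')' else '('))

def solution_alt (p : String) : String :=
  String.ofList ((chunksB p.toList).foldr stepB [])

-- ===== PRECONDITION & SPEC =====
def Spec_solution (p : String) (out : String) : Prop := out = solution_alt p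
instance (p : String) (out : String) : Decidable (Spec_solution p out) := by unfold Spec_solution; infer_instance

-- ===== CLAIM (what is proved, stated in full; the proofs are below) =====
def Claim_equal_solution : Prop := ∀ (p : String), Dom_solution p → Spec_solution p (solution p)

-- ===== LEMMAS AND PROOFS =====

-- shifting cutB's index argument only shifts the returned index
theorem cutB_shift (rest : List Char) (c0 : Char) (bal : Int) (j : Nat) :
    cutB rest c0 bal (j + 1) = ((cutB rest c0 bal j).1 + 1, (cutB rest c0 bal j).2) := by
  induction rest generalizing bal j with
  | nil => simp [cutB]
  | cons c rs ih =>
      simp only [cutB]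
      by_cases hb : bal + (if c = c0 then 1 else -1) = 0
      · rw [if_pos hb, if_pos hb]
      · rw [if_neg hb, if_neg hb]; exact ih _ _

theorem cutB_snd_nonneg (rest : List Char) (c0 : Char) (bal : Int) (j : Nat)
    (h : 1 ≤ bal) : 0 ≤ (cutB rest c0 bal j).2 := by
  induction rest generalizing bal j with
  | nil => simp [cutB]; omega
  | cons c rs ih =>
      simp only [cutB]
      by_cases hb : bal + (if c = c0 then 1 else -1) = 0
      · rw [if_pos hb]; exact le_of_eq hb.symm
      · rw [if_neg hb]
        apply ih
        by_cases hc : c = c0 <;> simp [hc] at hb ⊢ <;> omega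

-- A's separation stack is always a pile of copies of p[0]; its size is B's balance counter.
theorem sepLoopA_eq_cutB (rest : List Char) (c0 : Char) :
    ∀ (k : ℕ) (u : List Char), 1 ≤ k →
      sepLoopA rest u (List.replicate k c0)
        = (u ++ rest.take (cutB rest c0 (k : Int) 0).1,
           rest.drop (cutB rest c0 (k : Int) 0).1) := by
  induction rest with
  | nil =>
      intro k u hk
      cases k with
      | zero => omega
      | succ m => simp [sepLoopA, cutB]
  | cons c rs ih =>
      intro k u hk
      cases k with
      | zero => omega
      | succ m =>
          by_cases hc : c = c0
          · have hbal : ((m + 1 : ℕ) : Int) + 1 = ((m + 2 : ℕ) : Int) := by push_cast; ring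
            have hcut : cutB (c :: rs) c0 ((m + 1 : ℕ) : Int) 0
                = ((cutB rs c0 ((m + 2 : ℕ) : Int) 0).1 + 1, (cutB rs c0 ((m + 2 : ℕ) : Int) 0).2) := by
              simp only [cutB, if_pos hc, hbal]
              rw [if_neg (by exact_mod_cast Nat.succ_ne_zero (m + 1)), cutB_shift]
            rw [hcut]
            have hrec := ih (m + 2) (u ++ [c]) (by omega)
            have hL : sepLoopA (c :: rs) u (List.replicate (m + 1) c0)
                = sepLoopA rs (u ++ [c]) (List.replicate (m + 2) c0) := by
              subst hc
              simp [sepLoopA, List.replicate_succ]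
            rw [hL, hrec]
            simp [List.take_succ_cons, List.drop_succ_cons]
          · cases m with
            | zero =>
                have hcut : cutB (c :: rs) c0 ((1 : ℕ) : Int) 0 = (1, 0) := by
                  simp [cutB, hc]
                rw [hcut]
                simp [sepLoopA, hc]
            | succ m' =>
                have hbal : ((m' + 2 : ℕ) : Int) + -1 = ((m' + 1 : ℕ) : Int) := by push_cast; ring
                have hcut : cutB (c :: rs) c0 ((m' + 2 : ℕ) : Int) 0
                    = ((cutB rs c0 ((m' + 1 : ℕ) : Int) 0).1 + 1, (cutB rs c0 ((m' + 1 : ℕ) : Int) 0).2) := by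
                  simp only [cutB, if_neg hc, hbal]
                  rw [if_neg (by exact_mod_cast Nat.succ_ne_zero m'), cutB_shift]
                rw [hcut]
                have hrec := ih (m' + 1) (u ++ [c]) (by omega)
                have hL : sepLoopA (c :: rs) u (List.replicate (m' + 2) c0)
                    = sepLoopA rs (u ++ [c]) (List.replicate (m' + 1) c0) := by
                  simp [sepLoopA, List.replicate_succ, hc]
                rw [hL, hrec]
                simp [List.take_succ_cons, List.drop_succ_cons]

-- is_right's stack over the separated chunk is the same pile; it ends with bal copies.
theorem isRightLoopA_eq (rest : List Char) (c0 : Char) :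
    ∀ (k : ℕ), 1 ≤ k →
      isRightLoopA (rest.take (cutB rest c0 (k : Int) 0).1) (List.replicate k c0)
        = List.replicate (cutB rest c0 (k : Int) 0).2.toNat c0 := by
  induction rest with
  | nil =>
      intro k hk
      cases k with
      | zero => omega
      | succ m => simp [cutB, isRightLoopA]
  | cons c rs ih =>
      intro k hk
      cases k with
      | zero => omega
      | succ m =>
          by_cases hc : c = c0
          · have hbal : ((m + 1 : ℕ) : Int) + 1 = ((m + 2 : ℕ) : Int) := by push_cast; ring
            have hcut : cutB (c :: rs) c0 ((m + 1 : ℕ) : Int) 0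
                = ((cutB rs c0 ((m + 2 : ℕ) : Int) 0).1 + 1, (cutB rs c0 ((m + 2 : ℕ) : Int) 0).2) := by
              simp only [cutB, if_pos hc, hbal]
              rw [if_neg (by exact_mod_cast Nat.succ_ne_zero (m + 1)), cutB_shift]
            rw [hcut]
            have hrec := ih (m + 2) (by omega)
            rw [List.take_succ_cons]
            have hL : isRightLoopA (c :: rs.take (cutB rs c0 ((m + 2 : ℕ) : Int) 0).1)
                  (List.replicate (m + 1) c0)
                = isRightLoopA (rs.take (cutB rs c0 ((m + 2 : ℕ) : Int) 0).1)
                  (List.replicate (m + 2) c0) := by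
              subst hc
              simp [isRightLoopA, List.replicate_succ]
            rw [hL, hrec]
          · cases m with
            | zero =>
                have hcut : cutB (c :: rs) c0 ((1 : ℕ) : Int) 0 = (1, 0) := by
                  simp [cutB, hc]
                rw [hcut]
                simp [isRightLoopA, Ne.symm hc]
            | succ m' =>
                have hbal : ((m' + 2 : ℕ) : Int) + -1 = ((m' + 1 : ℕ) : Int) := by push_cast; ring
                have hcut : cutB (c :: rs) c0 ((m' + 2 : ℕ) : Int) 0
                    = ((cutB rs c0 ((m' + 1 : ℕ) : Int) 0).1 + 1, (cutB rs c0 ((m' + 1 : ℕ) : Int) 0).2) := by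
                  simp only [cutB, if_neg hc, hbal]
                  rw [if_neg (by exact_mod_cast Nat.succ_ne_zero m'), cutB_shift]
                rw [hcut]
                have hrec := ih (m' + 1) (by omega)
                rw [List.take_succ_cons]
                have hL : isRightLoopA (c :: rs.take (cutB rs c0 ((m' + 1 : ℕ) : Int) 0).1)
                      (List.replicate (m' + 2) c0)
                    = isRightLoopA (rs.take (cutB rs c0 ((m' + 1 : ℕ) : Int) 0).1)
                      (List.replicate (m' + 1) c0) := by
                  simp [isRightLoopA, List.replicate_succ, Ne.symm hc]
                rw [hL, hrec]

theorem flipA_eq_map (l : List Char) :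
    flipA l = l.map (fun ch => if ch = '(' then ')' else '(') := by
  induction l with
  | nil => rfl
  | cons c rs ih => simp [flipA, ih]

-- B's outer loop peels exactly the chunk A's seperation cuts
theorem chunksB_cons (c : Char) (rs : List Char) :
    chunksB (c :: rs)
      = (c :: rs.take (cutB rs c 1 0).1, (cutB rs c 1 0).2)
        :: chunksB (rs.drop (cutB rs c 1 0).1) := by
  have hcut : cutB (c :: rs) c 0 0 = ((cutB rs c 1 0).1 + 1, (cutB rs c 1 0).2) := by
    simp only [cutB]
    norm_num
    rw [cutB_shift]
  rw [chunksB]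
  simp [hcut, List.take_succ_cons, List.drop_succ_cons]

theorem solA_eq_foldr : ∀ (n : ℕ) (l : List Char), l.length ≤ n →
    solA l = (chunksB l).foldr stepB [] := by
  intro n
  induction n with
  | zero =>
      intro l hl
      have : l = [] := List.eq_nil_of_length_eq_zero (Nat.le_zero.mp hl)
      subst this; rw [solA, chunksB]; rfl
  | succ n ih =>
      intro l hl
      cases l with
      | nil => rw [solA, chunksB]; rfl
      | cons c rs =>
          have hsep := sepLoopA_eq_cutB rs c 1 [c] (le_refl 1)
          simp only [List.replicate_one, Nat.cast_one] at hsep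
          have h1 := isRightLoopA_eq rs c 1 (le_refl 1)
          simp only [List.replicate_one, Nat.cast_one] at h1
          set m := (cutB rs c (1 : Int) 0).1 with hm
          set bal := (cutB rs c (1 : Int) 0).2 with hbal
          have hbal0 : 0 ≤ bal := cutB_snd_nonneg rs c 1 0 (le_refl 1)
          have hvlen : (rs.drop m).length ≤ n := by
            have := List.length_drop (l := rs) (i := m)
            simp only [List.length_cons] at hl
            omega
          have hIH := ih (rs.drop m) hvlen
          rw [solA, chunksB_cons]
          simp only [seperationA, hsep, List.singleton_append, List.foldr_cons]
          have hright : isRightA (c :: rs.take m) = (decide (bal = 0) && decide (c ≠ ')')) := by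
            simp only [isRightA]
            by_cases hcp : c = ')'
            · simp [hcp]
            · rw [if_neg hcp, h1]
              by_cases hb : bal = 0
              · simp [hb, hcp]
              · obtain ⟨j, hj⟩ : ∃ j, bal.toNat = j + 1 := ⟨bal.toNat - 1, by omega⟩
                rw [hj]
                simp [hb, hcp, List.replicate_succ]
          rw [hright]
          by_cases hb : bal = 0 ∧ c ≠ ')'
          · have ht : (decide (bal = 0) && decide (c ≠ ')')) = true := by
              simp [hb.1, hb.2]
            rw [ht]
            simp only [if_true, stepB, List.headD_cons]
            rw [if_pos hb, ← hm, hIH]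
          · have ht : (decide (bal = 0) && decide (c ≠ ')')) = false := by
              rcases not_and_or.mp hb with h | h
              · simp [h]
              · simp [not_not.mp (by simpa using h)]
            rw [ht]
            simp only [Bool.false_eq_true, if_false, stepB, List.headD_cons]
            rw [if_neg hb, flipA_eq_map, ← hm, hIH]

-- ===== VERDICT (by name: the statement is the Claim_ definition above) =====
theorem solution_spec : Claim_equal_solution := by
  intro p _
  unfold Spec_solution solution solution_alt
  rw [solA_eq_foldr p.toList.length p.toList (le_refl _)]
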